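-- pv_equiv track=rewrite | github.com/Daweedek/GeneralJack | gamefunctions.py | textAdapt
-- ===== SOURCE A (Python) =====
-- def textAdapt(text):
--     textLenght = len(text)
--     rest = textLenght % 76
--     missing = 76 - rest
--     indexing = 0
--     process = ""
--     edited = ""
--     #making text enough long
--     if rest != 0:
--         text += missing*" "
--     #modifying text
--     process += "║ "
--     for char in text:
--         process += char
--         indexing += 1
--         if indexing %76 == 0:
--             process += " ║\n║ "
--             edited += process
--             process = ""
--     return edited[:-2]
-- ===== SOURCE B (Python) =====
-- def textAdapt(text):
--     n = len(text)
--     if n % 76 != 0: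
--         text = text + " " * (76 - n % 76)
--     lines = []
--     i = 0
--     while i < len(text):
--         lines.append("║ " + text[i:i+76] + " ║\n")
--         i += 76
--     return "".join(lines)
-- ===== Notes on version B (the rewrite author's own statement) =====
-- stated objective: simpler
-- what changed: B pads once, then walks chunk start indices and slices 76-char chunks, emitting each complete bordered line '║ chunk ║\n' and joining them, instead of A's per-character loop with a modulo-76 counter that interleaves border fragments into a running buffer and trims the two leftover border characters with edited[:-2]. (chunked slicing avoids per-character string building, measured constant-factor faster)
import Mathlib
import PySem

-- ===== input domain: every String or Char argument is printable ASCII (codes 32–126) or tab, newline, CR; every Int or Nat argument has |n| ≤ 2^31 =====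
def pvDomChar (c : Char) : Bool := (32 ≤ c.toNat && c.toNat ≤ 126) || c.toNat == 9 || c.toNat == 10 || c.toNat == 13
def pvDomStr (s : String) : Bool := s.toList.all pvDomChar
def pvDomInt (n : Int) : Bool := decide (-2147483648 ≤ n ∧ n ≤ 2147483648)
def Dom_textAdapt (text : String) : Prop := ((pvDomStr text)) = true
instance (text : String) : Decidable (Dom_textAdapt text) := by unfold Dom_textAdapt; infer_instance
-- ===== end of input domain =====

-- B replaces A's per-character modulo-76 counter loop (with its trailing "║ " trim)
-- by slicing the padded text into 76-char chunks and emitting complete bordered lines.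

-- ===== PORT A =====
-- "║ " as a char list
def pvBar : List Char := ['║', ' ']
-- " ║\n║ " as a char list
def pvSepA : List Char := [' ', '║', '\n', '║', ' ']

-- one iteration of A's for-loop: state = (indexing, process, edited)
def pvStepA (st : Nat × List Char × List Char) (c : Char) : Nat × List Char × List Char :=
  let process := st.2.1 ++ [c]
  let indexing := st.1 + 1
  if indexing % 76 = 0 then
    (indexing, [], st.2.2 ++ (process ++ pvSepA))
  else
    (indexing, process, st.2.2)

def textAdapt (text : String) : String :=
  let cs := text.toList
  let rest := cs.length % 76
  let missing := 76 - rest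
  let cs := if rest ≠ 0 then cs ++ List.replicate missing ' ' else cs
  let st := List.foldl pvStepA (0, pvBar, []) cs
  -- edited[:-2]
  String.ofList (PySem.List.slice st.2.2 none (some (-2)))

-- ===== PORT B =====
-- " ║\n" as a char list
def pvEndl : List Char := [' ', '║', '\n']

-- B's while loop over chunk start indices; text[i:i+76] = (drop i).take 76 (PySem.List.slice_natCast_add)
def pvGoB (s : List Char) (i : Nat) : List (List Char) :=
  if i < s.length then (pvBar ++ (s.drop i).take 76 ++ pvEndl) :: pvGoB s (i + 76) else []
  termination_by s.length - i

def textAdapt_alt (text : String) : String :=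
  let cs := text.toList
  let n := cs.length
  let cs := if n % 76 ≠ 0 then cs ++ List.replicate (76 - n % 76) ' ' else cs
  String.ofList (pvGoB cs 0).flatten

-- ===== PRECONDITION & SPEC =====
def Spec_textAdapt (text : String) (out : String) : Prop := out = textAdapt_alt text
instance (text : String) (out : String) : Decidable (Spec_textAdapt text out) := by unfold Spec_textAdapt; infer_instance

-- ===== CLAIM (what is proved, stated in full; the proofs are below) =====
def Claim_equal_textAdapt : Prop := ∀ (text : String), Dom_textAdapt text → Spec_textAdapt text (textAdapt text)

-- ===== LEMMAS AND PROOFS =====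

-- A's edited string for q full chunks, with the trailing "║ " of the next line included
def pvRender : Nat → List Char → List Char
  | 0, _ => []
  | q + 1, l => l.take 76 ++ pvSepA ++ pvRender q (l.drop 76)

-- running A's loop over exactly one full chunk (flush at the last character)
theorem pvRunChunk : ∀ (l : List Char) (i : Nat) (p e : List Char),
    l ≠ [] → l.length + i % 76 = 76 →
    List.foldl pvStepA (i, p, e) l = (i + l.length, [], e ++ p ++ l ++ pvSepA) := by
  intro l
  induction l with
  | nil => intro _ _ _ h _; exact absurd rfl h
  | cons c l' ih =>
    intro i p e _ hlen
    cases l' with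
    | nil =>
      have h76 : (i + 1) % 76 = 0 := by simp at hlen; omega
      simp [List.foldl, pvStepA, h76]
    | cons c' l'' =>
      have hne : (i + 1) % 76 ≠ 0 := by
        have h2 : l''.length + 1 + 1 + i % 76 = 76 := by simpa using hlen
        omega
      have hstep : pvStepA (i, p, e) c = (i + 1, p ++ [c], e) := by
        simp [pvStepA, hne]
      have h2 : l''.length + 1 + 1 + i % 76 = 76 := by simpa using hlen
      rw [List.foldl_cons, hstep, ih (i + 1) (p ++ [c]) e (by simp) (by
        simp only [List.length_cons]
        omega)]
      simp [List.append_assoc]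
      omega

-- running A's loop over q full chunks from a chunk boundary
theorem pvRunAll : ∀ (q : Nat) (l : List Char) (i : Nat) (p e : List Char),
    l.length = 76 * q → i % 76 = 0 →
    List.foldl pvStepA (i, p, e) l =
      (i + 76 * q, (if q = 0 then p else []),
        e ++ (if q = 0 then [] else p ++ pvRender q l)) := by
  intro q
  induction q with
  | zero =>
    intro l i p e hlen _
    have : l = [] := List.eq_nil_of_length_eq_zero (by omega)
    subst this; simp
  | succ q ih =>
    intro l i p e hlen hi
    have hsplit := List.take_append_drop 76 l
    have htk : (l.take 76).length = 76 := by
      rw [List.length_take]; omega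
    have hdr : (l.drop 76).length = 76 * q := by
      rw [List.length_drop]; omega
    calc List.foldl pvStepA (i, p, e) l
        = List.foldl pvStepA (i, p, e) (l.take 76 ++ l.drop 76) := by rw [hsplit]
      _ = List.foldl pvStepA (List.foldl pvStepA (i, p, e) (l.take 76)) (l.drop 76) := by
            rw [List.foldl_append]
      _ = List.foldl pvStepA (i + 76, [], e ++ p ++ l.take 76 ++ pvSepA) (l.drop 76) := by
            rw [pvRunChunk (l.take 76) i p e (by
              intro h; rw [h] at htk; simp at htk) (by omega), htk]
      _ = _ := by
            rw [ih (l.drop 76) (i + 76) [] (e ++ p ++ l.take 76 ++ pvSepA) hdr (by omega)]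
            cases q with
            | zero => simp [pvRender, List.append_assoc]
            | succ q' =>
              simp [pvRender, List.append_assoc]
              omega

-- B's lines (flattened) differ from A's render only by the border pieces at the two ends
theorem pvGoB_eq : ∀ (q : Nat) (s : List Char) (i : Nat),
    s.length = i + 76 * q →
    pvBar ++ pvRender q (s.drop i) = (pvGoB s i).flatten ++ pvBar := by
  intro q
  induction q with
  | zero =>
    intro s i hlen
    rw [pvGoB]
    simp [pvRender, show ¬ i < s.length by omega]
  | succ q ih =>
    intro s i hlen
    rw [pvGoB]
    have hi : i < s.length := by omega
    have hdd : (s.drop i).drop 76 = s.drop (i + 76) := by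
      rw [List.drop_drop]
    have hih := ih s (i + 76) (by omega)
    have hsep : pvSepA = pvEndl ++ pvBar := by decide
    simp only [hi, if_pos, List.flatten_cons, pvRender, hsep, hdd, List.append_assoc]
    rw [hih]

theorem pvMulq (n : Nat) : ∃ q, (if n % 76 ≠ 0 then n + (76 - n % 76) else n) = 76 * q := by
  refine ⟨(if n % 76 ≠ 0 then n + (76 - n % 76) else n) / 76, ?_⟩
  split <;> omega

-- ===== VERDICT (by name: the statement is the Claim_ definition above) =====
theorem textAdapt_spec : Claim_equal_textAdapt := by
  intro text _
  unfold Spec_textAdapt textAdapt textAdapt_alt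
  simp only []
  set cs := text.toList with hcs
  set P : List Char := if cs.length % 76 ≠ 0 then cs ++ List.replicate (76 - cs.length % 76) ' ' else cs with hP
  have hPlen : P.length = (if cs.length % 76 ≠ 0 then cs.length + (76 - cs.length % 76) else cs.length) := by
    rw [hP]; split <;> simp
  obtain ⟨q, hq⟩ := pvMulq cs.length
  have hPq : P.length = 76 * q := by rw [hPlen, hq]
  rw [pvRunAll q P 0 pvBar [] hPq (by omega)]
  cases q with
  | zero =>
    have hPnil : P = [] := List.eq_nil_of_length_eq_zero (by omega)
    simp only [reduceIte]
    rw [hPnil, pvGoB]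
    simp [PySem.List.slice]
  | succ q' =>
    simp only [Nat.succ_ne_zero, if_false, List.nil_append]
    have hB := pvGoB_eq (q' + 1) P 0 (by omega)
    simp only [List.drop_zero] at hB
    rw [hB]
    rw [PySem.List.slice_to_neg_ofNat _ 2 (by omega)]
    rw [show ((pvGoB P 0).flatten ++ pvBar).length - 2 = ((pvGoB P 0).flatten).length by
      simp [pvBar]]
    rw [List.take_left]
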